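-- pv_equiv track=rewrite | github.com/olivia-rippee/Python-for-Computational-Biology-and-Bioinformatics | Bioinformatics III - Comparing Genes, Proteins, and Genomes/2 Aligning DNA Strings.py | OverlapAlignment
-- ===== SOURCE A (Python) =====
-- def OverlapAlignment(v, w, match, mismatch, indel):
--     n, m = len(v), len(w)
--
--     # DP and backtrack matrices
--     dp = [[0] * (m + 1) for _ in range(n + 1)]
--     backtrack = [[None] * (m + 1) for _ in range(n + 1)]
--
--     # Initialize
--     for j in range(1, m + 1):
--         dp[0][j] = -indel * j  # must align prefix of w
--     for i in range(1, n + 1):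
--         dp[i][0] = 0  # allow alignment to start at any suffix of v
--
--     # Fill DP matrix
--     for i in range(1, n + 1):
--         for j in range(1, m + 1):
--             if v[i - 1] == w[j - 1]:
--                 score = match
--             else:
--                 score = -mismatch
--
--             options = [
--                 (dp[i - 1][j] - indel, 'up'),
--                 (dp[i][j - 1] - indel, 'left'),
--                 (dp[i - 1][j - 1] + score, 'diag')
--             ]
--
--             dp[i][j], backtrack[i][j] = max(options)
--
--     # Find the best alignment score in the last column (w is fully aligned)
--     max_score = float('-inf')
--     max_i = -1
--     for i in range(1, n + 1):
--         if dp[i][m] > max_score: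
--             max_score = dp[i][m]
--             max_i = i
--
--     # Backtrack from (max_i, m)
--     i, j = max_i, m
--     v_aligned = []
--     w_aligned = []
--
--     while j > 0:
--         move = backtrack[i][j]
--         if move == 'diag':
--             v_aligned.append(v[i - 1])
--             w_aligned.append(w[j - 1])
--             i -= 1
--             j -= 1
--         elif move == 'up':
--             v_aligned.append(v[i - 1])
--             w_aligned.append('-')
--             i -= 1
--         elif move == 'left':
--             v_aligned.append('-')
--             w_aligned.append(w[j - 1])
--             j -= 1
--
--     v_aligned = ''.join(reversed(v_aligned))
--     w_aligned = ''.join(reversed(w_aligned))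
--
--     return max_score, v_aligned, w_aligned
-- ===== SOURCE B (Python) =====
-- def OverlapAlignment(v, w, match, mismatch, indel):
--     n, m = len(v), len(w)
--
--     def next_row(prev, c):
--         # build row i from row i-1 functionally (column 0 is free)
--         row = [0]
--         for j in range(1, m + 1):
--             s = match if c == w[j - 1] else -mismatch
--             row.append(max(prev[j] - indel, row[j - 1] - indel, prev[j - 1] + s))
--         return row
--
--     # rows[0] pays for the skipped prefix of w; each later row from the previous one
--     rows = [[-indel * j for j in range(m + 1)]]
--     prev = rows[0]
--     for c in v:
--         prev = next_row(prev, c)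
--         rows.append(prev)
--
--     # first row with maximal score in the last column
--     best = 1
--     for i in range(2, n + 1):
--         if rows[i][m] > rows[best][m]:
--             best = i
--
--     def trace(i, j):
--         # re-derive the move at (i, j) from the score rows (tie order up/left/diag)
--         if i == 0 or j == 0:
--             return '', ''
--         s = match if v[i - 1] == w[j - 1] else -mismatch
--         up = rows[i - 1][j] - indel
--         left = rows[i][j - 1] - indel
--         diag = rows[i - 1][j - 1] + s
--         if up >= left and up >= diag:
--             a, b = trace(i - 1, j)
--             return a + v[i - 1], b + '-'
--         if left >= diag:
--             a, b = trace(i, j - 1)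
--             return a + '-', b + w[j - 1]
--         a, b = trace(i - 1, j - 1)
--         return a + v[i - 1], b + w[j - 1]
--
--     va, wa = trace(best, m)
--     return rows[best][m], va, wa
-- ===== Notes on version B (the rewrite author's own statement) =====
-- stated objective: alternative
-- what changed: B replaces A's two mutated matrices (dp + stored backtrack moves) by a purely functional row-by-row construction (each score row is built from the previous row alone, no 2D mutation) and a recursive traceback that re-derives each move from the score rows by plain comparisons (tie order up/left/diag preserved) and builds the aligned strings forward, so the stored move matrix, the tagged-tuple max and the final reversal all disappear; B's traceback stops at row 0, where A's while loop spins forever on a None move.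
-- outside the precondition, e.g. on OverlapAlignment('', '', 0, 0, 0): A returns (-inf, '', ''), B raises IndexError; on OverlapAlignment('A', 'AC', 1, 1, 0): A returns (1, 'A-', 'AC'), B returns (1, 'A-', 'AC')
import Mathlib
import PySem

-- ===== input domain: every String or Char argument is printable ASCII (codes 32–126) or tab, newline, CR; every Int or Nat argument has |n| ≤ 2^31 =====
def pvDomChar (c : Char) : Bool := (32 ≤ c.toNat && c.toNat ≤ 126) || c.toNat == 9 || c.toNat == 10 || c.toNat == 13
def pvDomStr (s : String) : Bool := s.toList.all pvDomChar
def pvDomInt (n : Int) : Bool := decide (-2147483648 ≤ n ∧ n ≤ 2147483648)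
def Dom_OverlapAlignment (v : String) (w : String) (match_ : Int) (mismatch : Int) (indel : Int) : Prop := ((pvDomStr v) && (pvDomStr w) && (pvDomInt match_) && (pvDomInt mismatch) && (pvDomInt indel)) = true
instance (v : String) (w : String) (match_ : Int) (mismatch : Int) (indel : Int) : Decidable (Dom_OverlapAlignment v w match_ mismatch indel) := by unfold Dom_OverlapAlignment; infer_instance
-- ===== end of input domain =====

-- B replaces A's two mutated matrices (dp + stored backtrack moves) by a functional row-by-row
-- score construction and a recursive traceback that re-derives each move by comparisons
-- (objective: alternative).

-- ===== PORT A =====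
-- Python's matrix[i][j] read and in-place write, as A performs them (all of A's accesses are at
-- in-range non-negative indices, where these are exact)
def pvGet2 {α : Type} (d : List (List α)) (dflt : α) (i j : Nat) : α := (d.getD i []).getD j dflt

def pvSet2 {α : Type} (d : List (List α)) (i j : Nat) (x : α) : List (List α) :=
  d.set i ((d.getD i []).set j x)

-- Python's lexicographic `<` on strings (exact on any strings; used only on the three move tags).
def pvStrLt : List Char → List Char → Bool
  | _, [] => false
  | [], _ :: _ => true
  | a :: as, b :: bs => if a < b then true else if b < a then false else pvStrLt as bs

-- Python's max of two (int, str) tuples: lexicographic tuple comparison, first wins ties.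
def pvMax2 (p q : Int × String) : Int × String :=
  if p.1 < q.1 ∨ (p.1 = q.1 ∧ pvStrLt p.2.toList q.2.toList) then q else p

-- score at cell (i, j), i ≥ 1, j ≥ 1: match if v[i-1] == w[j-1] else -mismatch
def pvScore (vl wl : List Char) (ma mm : Int) (i j : Nat) : Int :=
  if vl.getD (i - 1) ' ' == wl.getD (j - 1) ' ' then ma else -mm

def pvCellA (vl wl : List Char) (ma mm ind : Int) (i : Nat)
    (db : List (List Int) × List (List (Option String))) (j : Nat) :
    List (List Int) × List (List (Option String)) :=
  let score := pvScore vl wl ma mm i j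
  let mx := pvMax2 (pvMax2 (pvGet2 db.1 0 (i - 1) j - ind, "up") (pvGet2 db.1 0 i (j - 1) - ind, "left"))
      (pvGet2 db.1 0 (i - 1) (j - 1) + score, "diag")
  (pvSet2 db.1 i j mx.1, pvSet2 db.2 i j (some mx.2))

def pvRowA (vl wl : List Char) (ma mm ind : Int) (m : Nat)
    (db : List (List Int) × List (List (Option String))) (i : Nat) :
    List (List Int) × List (List (Option String)) :=
  (List.range' 1 m).foldl (pvCellA vl wl ma mm ind i) db

def pvFillA (vl wl : List Char) (ma mm ind : Int) (n m : Nat) :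
    List (List Int) × List (List (Option String)) :=
  let dp0 := List.replicate (n + 1) (List.replicate (m + 1) (0 : Int))
  let bt0 := List.replicate (n + 1) (List.replicate (m + 1) (none : Option String))
  let dp1 := (List.range' 1 m).foldl (fun d j => pvSet2 d 0 j (-ind * (j : Int))) dp0
  let dp2 := (List.range' 1 n).foldl (fun d i => pvSet2 d i 0 0) dp1
  (List.range' 1 n).foldl (pvRowA vl wl ma mm ind m) (dp2, bt0)

-- max_score starts as float('-inf') (modelled as none), max_i as -1
def pvBStepA (dp : List (List Int)) (m : Nat) (p : Option Int × Int) (i : Nat) : Option Int × Int :=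
  if (match p.1 with | none => true | some s => decide (s < pvGet2 dp 0 i m)) then
    (some (pvGet2 dp 0 i m), (i : Int))
  else p

def pvBestA (dp : List (List Int)) (n m : Nat) : Option Int × Int :=
  (List.range' 1 n).foldl (pvBStepA dp m) (none, -1)

-- fuel-bounded while loop; when the move is None Python loops forever with unchanged state, the
-- port burns fuel and returns the accumulators (only inputs outside Pre_ reach that)
def pvTraceA (bt : List (List (Option String))) (vl wl : List Char) :
    Nat → Nat → Nat → List Char → List Char → List Char × List Char
  | 0, _, _, va, wa => (va, wa)
  | fuel + 1, i, j, va, wa =>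
    if 0 < j then
      let mv := pvGet2 bt none i j
      if mv == some "diag" then
        pvTraceA bt vl wl fuel (i - 1) (j - 1) (va ++ [vl.getD (i - 1) ' ']) (wa ++ [wl.getD (j - 1) ' '])
      else if mv == some "up" then
        pvTraceA bt vl wl fuel (i - 1) j (va ++ [vl.getD (i - 1) ' ']) (wa ++ ['-'])
      else if mv == some "left" then
        pvTraceA bt vl wl fuel i (j - 1) (va ++ ['-']) (wa ++ [wl.getD (j - 1) ' '])
      else pvTraceA bt vl wl fuel i j va wa
    else (va, wa)

def OverlapAlignment (v : String) (w : String) (match_ : Int) (mismatch : Int) (indel : Int) :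
    Int × String × String :=
  let vl := v.toList
  let wl := w.toList
  let n := vl.length
  let m := wl.length
  let db := pvFillA vl wl match_ mismatch indel n m
  let p := pvBestA db.1 n m
  let tb := pvTraceA db.2 vl wl (p.2.toNat + m) p.2.toNat m [] []
  (p.1.getD 0, String.mk tb.1.reverse, String.mk tb.2.reverse)

-- ===== PORT B =====
-- one append step of next_row's inner loop: reads prev[j], row[j-1], prev[j-1]
def pvBRowStep (wl : List Char) (ma mm ind : Int) (prev : List Int) (c : Char)
    (row : List Int) (j : Nat) : List Int :=
  let s := if c == wl.getD (j - 1) ' ' then ma else -mm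
  row ++ [max (max (prev.getD j 0 - ind) (row.getD (j - 1) 0 - ind)) (prev.getD (j - 1) 0 + s)]

-- next_row(prev, c): row i built functionally from row i-1 alone
def pvBNextRow (wl : List Char) (ma mm ind : Int) (m : Nat) (prev : List Int) (c : Char) :
    List Int :=
  (List.range' 1 m).foldl (pvBRowStep wl ma mm ind prev c) [0]

-- rows: row 0 by comprehension, then one new row per character of v (prev carried alongside)
def pvBRows (vl wl : List Char) (ma mm ind : Int) (m : Nat) : List (List Int) :=
  let row0 := (List.range (m + 1)).map fun (j : Nat) => -ind * (j : Int)
  (vl.foldl (fun rp c =>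
      let nr := pvBNextRow wl ma mm ind m rp.2 c
      (rp.1 ++ [nr], nr)) ([row0], row0)).1

-- first row with maximal score in the last column
def pvBBest (rows : List (List Int)) (n m : Nat) : Nat :=
  (List.range' 2 (n - 1)).foldl
    (fun b i => if (rows.getD b []).getD m 0 < (rows.getD i []).getD m 0 then i else b) 1

-- recursive traceback: re-derives each move from the score rows, builds the alignment forward
def pvBTrace (rows : List (List Int)) (vl wl : List Char) (ma mm ind : Int) :
    Nat → Nat → List Char × List Char
  | 0, _ => ([], [])
  | _ + 1, 0 => ([], [])
  | i + 1, j + 1 =>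
    let s := if vl.getD i ' ' == wl.getD j ' ' then ma else -mm
    let up := (rows.getD i []).getD (j + 1) 0 - ind
    let left := (rows.getD (i + 1) []).getD j 0 - ind
    let diag := (rows.getD i []).getD j 0 + s
    if left ≤ up ∧ diag ≤ up then
      let p := pvBTrace rows vl wl ma mm ind i (j + 1)
      (p.1 ++ [vl.getD i ' '], p.2 ++ ['-'])
    else if diag ≤ left then
      let p := pvBTrace rows vl wl ma mm ind (i + 1) j
      (p.1 ++ ['-'], p.2 ++ [wl.getD j ' '])
    else
      let p := pvBTrace rows vl wl ma mm ind i j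
      (p.1 ++ [vl.getD i ' '], p.2 ++ [wl.getD j ' '])
  termination_by i j => (i, j)

def OverlapAlignment_alt (v : String) (w : String) (match_ : Int) (mismatch : Int) (indel : Int) :
    Int × String × String :=
  let vl := v.toList
  let wl := w.toList
  let n := vl.length
  let m := wl.length
  let rows := pvBRows vl wl match_ mismatch indel m
  let best := pvBBest rows n m
  let p := pvBTrace rows vl wl match_ mismatch indel best m
  ((rows.getD best []).getD m 0, String.mk p.1, String.mk p.2)

-- ===== PRECONDITION & SPEC =====
-- Pre_ excludes v = "" (A then returns float('-inf'), not an int) and, via a conservative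
-- closed-form condition on v's first character, w and the scores (a scan of the first-row
-- substitution scores and their prefix maxima), the inputs on which A's traceback can reach
-- row 0 with columns of w left, where its while loop reads a None move and loops forever;
-- the condition is sufficient, so it also excludes some inputs on which A returns (see the
-- cites in the claim), and on those A and B return the same value.
def pvRow1Ok (ind : Int) : Int → Int → List Int → Bool
  | _, _, [] => true
  | prev, pm, x :: xs =>
    (decide (x ≤ prev) || decide (x ≤ -ind) || (decide (0 < ind) && decide (x ≤ pm))) &&
      pvRow1Ok ind x (max pm x) xs

def Pre_OverlapAlignment (v : String) (w : String) (match_ : Int) (mismatch : Int) (indel : Int) : Prop :=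
  v.toList ≠ [] ∧
  (w.toList.all fun c =>
    decide ((if v.toList.headD ' ' == c then match_ else -mismatch) + 2 * indel > 0) ||
      decide (0 < indel)) = true ∧
  ((match w.toList.map (fun c => if v.toList.headD ' ' == c then match_ else -mismatch) with
    | [] => true
    | x :: xs => pvRow1Ok indel x x xs) = true)

instance (v : String) (w : String) (match_ : Int) (mismatch : Int) (indel : Int) :
    Decidable (Pre_OverlapAlignment v w match_ mismatch indel) := by
  unfold Pre_OverlapAlignment; infer_instance

def pvWitness_OverlapAlignment : String × String × Int × Int × Int := ("AC", "A", 1, 1, 1)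

def Spec_OverlapAlignment (v : String) (w : String) (match_ : Int) (mismatch : Int) (indel : Int)
    (out : Int × String × String) : Prop := out = OverlapAlignment_alt v w match_ mismatch indel

instance (v : String) (w : String) (match_ : Int) (mismatch : Int) (indel : Int)
    (out : Int × String × String) : Decidable (Spec_OverlapAlignment v w match_ mismatch indel out) := by
  unfold Spec_OverlapAlignment; infer_instance

-- ===== CLAIM (what is proved, stated in full; the proofs are below) =====
def Claim_equal_OverlapAlignment : Prop := ∀ (v : String) (w : String) (match_ : Int) (mismatch : Int) (indel : Int), Dom_OverlapAlignment v w match_ mismatch indel → Pre_OverlapAlignment v w match_ mismatch indel → Spec_OverlapAlignment v w match_ mismatch indel (OverlapAlignment v w match_ mismatch indel)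

-- ===== LEMMAS AND PROOFS =====

-- the mathematical dp table both fills compute
def pvD (vl wl : List Char) (ma mm ind : Int) : Nat → Nat → Int
  | 0, j => -ind * (j : Int)
  | _ + 1, 0 => 0
  | i + 1, j + 1 =>
    max (max (pvD vl wl ma mm ind i (j + 1) - ind) (pvD vl wl ma mm ind (i + 1) j - ind))
      (pvD vl wl ma mm ind i j + pvScore vl wl ma mm (i + 1) (j + 1))
  termination_by i j => (i, j)

lemma pvD_row0 (vl wl : List Char) (ma mm ind : Int) (j : Nat) :
    pvD vl wl ma mm ind 0 j = -ind * (j : Int) := by simp [pvD]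

lemma pvD_col0 (vl wl : List Char) (ma mm ind : Int) (i : Nat) (hi : 1 ≤ i) :
    pvD vl wl ma mm ind i 0 = 0 := by
  cases i with
  | zero => omega
  | succ k => simp [pvD]

lemma pvD_cell (vl wl : List Char) (ma mm ind : Int) (i j : Nat) (hi : 1 ≤ i) (hj : 1 ≤ j) :
    pvD vl wl ma mm ind i j =
      max (max (pvD vl wl ma mm ind (i - 1) j - ind) (pvD vl wl ma mm ind i (j - 1) - ind))
        (pvD vl wl ma mm ind (i - 1) (j - 1) + pvScore vl wl ma mm i j) := by
  cases i with
  | zero => omega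
  | succ a =>
    cases j with
    | zero => omega
    | succ b => rw [pvD]; simp

-- a matrix whose entries are given by a function
def pvMat {α : Type} (f : Nat → Nat → α) (n m : Nat) : List (List α) :=
  (List.range (n + 1)).map fun i => (List.range (m + 1)).map (f i)

lemma pvMat_get {α : Type} (f : Nat → Nat → α) (n m : Nat) (dflt : α) (i j : Nat) :
    pvGet2 (pvMat f n m) dflt i j = if i ≤ n ∧ j ≤ m then f i j else dflt := by
  unfold pvGet2 pvMat
  by_cases hi : i ≤ n
  · have h1 : (((List.range (n + 1)).map fun i => (List.range (m + 1)).map (f i)).getD i []) =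
        (List.range (m + 1)).map (f i) := by
      rw [List.getD_eq_getElem?_getD, List.getElem?_map]
      rw [List.getElem?_range (by omega : i < n + 1)]
      rfl
    rw [h1]
    by_cases hj : j ≤ m
    · rw [List.getD_eq_getElem?_getD, List.getElem?_map, List.getElem?_range (by omega : j < m + 1)]
      simp [hi, hj]
    · rw [List.getD_eq_getElem?_getD]
      have : (List.range (m + 1))[j]? = none := by
        rw [List.getElem?_eq_none_iff]; simp; omega
      rw [List.getElem?_map, this]
      simp [hj]
  · have h1 : (((List.range (n + 1)).map fun i => (List.range (m + 1)).map (f i)).getD i []) = [] := by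
      rw [List.getD_eq_getElem?_getD]
      have : ((List.range (n + 1)).map fun i => (List.range (m + 1)).map (f i))[i]? = none := by
        rw [List.getElem?_eq_none_iff]; simp; omega
      rw [this]; rfl
    rw [h1]
    simp [hi]

lemma pvMat_set {α : Type} (f : Nat → Nat → α) (n m i j : Nat) (x : α)
    (hi : i ≤ n) (hj : j ≤ m) :
    pvSet2 (pvMat f n m) i j x =
      pvMat (fun i' j' => if i' = i ∧ j' = j then x else f i' j') n m := by
  unfold pvSet2 pvMat
  have hrow : (((List.range (n + 1)).map fun i => (List.range (m + 1)).map (f i)).getD i []) =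
      (List.range (m + 1)).map (f i) := by
    rw [List.getD_eq_getElem?_getD, List.getElem?_map]
    rw [List.getElem?_range (by omega : i < n + 1)]
    rfl
  rw [hrow]
  apply List.ext_getElem
  · simp
  · intro k hk1 hk2
    simp only [List.length_set, List.length_map, List.length_range] at hk1
    rw [List.getElem_set]
    by_cases hki : i = k
    · rw [if_pos hki]
      subst hki
      rw [List.getElem_map, List.getElem_range]
      apply List.ext_getElem
      · simp
      · intro l hl1 hl2
        simp only [List.length_set, List.length_map, List.length_range] at hl1
        rw [List.getElem_set, List.getElem_map, List.getElem_range]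
        by_cases hlj : j = l
        · subst hlj; simp
        · rw [if_neg hlj]
          have hne : ¬ (i = i ∧ l = j) := fun hc => hlj hc.2.symm
          rw [List.getElem_map, List.getElem_range]
          rw [show ((fun i' j' => if i' = i ∧ j' = j then x else f i' j') i l) =
            if i = i ∧ l = j then x else f i l from rfl, if_neg hne]
    · rw [if_neg hki]
      simp only [List.getElem_map, List.getElem_range]
      apply List.map_congr_left
      intro a ha
      have hne : ¬ (k = i ∧ a = j) := fun hc => hki hc.1.symm
      rw [if_neg hne]

lemma pvMat_congr {α : Type} (f g : Nat → Nat → α) (n m : Nat)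
    (h : ∀ i j, i ≤ n → j ≤ m → f i j = g i j) : pvMat f n m = pvMat g n m := by
  unfold pvMat
  apply List.map_congr_left
  intro i hi
  apply List.map_congr_left
  intro j hj
  exact h i j (by simpa using Nat.lt_succ_iff.mp (List.mem_range.mp hi))
    (by simpa using Nat.lt_succ_iff.mp (List.mem_range.mp hj))

lemma pvMat_const {α : Type} (c : α) (n m : Nat) :
    List.replicate (n + 1) (List.replicate (m + 1) c) = pvMat (fun _ _ => c) n m := by
  unfold pvMat
  apply List.ext_getElem
  · simp
  · intro k hk1 hk2
    rw [List.getElem_replicate, List.getElem_map]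
    apply List.ext_getElem
    · simp
    · intro l hl1 hl2
      rw [List.getElem_replicate, List.getElem_map]

-- the partially filled matrix entries: rows < i done, row i done up to column l
def pvPart (vl wl : List Char) (ma mm ind : Int) (n m i l : Nat) : Nat → Nat → Int :=
  fun i' j' =>
    if i' = 0 then pvD vl wl ma mm ind 0 j'
    else if 1 ≤ i' ∧ i' ≤ n ∧ 1 ≤ j' ∧ j' ≤ m ∧ (i' < i ∨ (i' = i ∧ j' ≤ l)) then
      pvD vl wl ma mm ind i' j'
    else 0

def pvTag (vl wl : List Char) (ma mm ind : Int) (i j : Nat) : String :=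
  (pvMax2 (pvMax2 (pvD vl wl ma mm ind (i - 1) j - ind, "up")
      (pvD vl wl ma mm ind i (j - 1) - ind, "left"))
    (pvD vl wl ma mm ind (i - 1) (j - 1) + pvScore vl wl ma mm i j, "diag")).2

def pvBPart (vl wl : List Char) (ma mm ind : Int) (n m i l : Nat) : Nat → Nat → Option String :=
  fun i' j' =>
    if 1 ≤ i' ∧ i' ≤ n ∧ 1 ≤ j' ∧ j' ≤ m ∧ (i' < i ∨ (i' = i ∧ j' ≤ l)) then
      some (pvTag vl wl ma mm ind i' j')
    else none

lemma pvMax2_fst (p q : Int × String) : (pvMax2 p q).1 = max p.1 q.1 := by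
  unfold pvMax2; split_ifs with h
  · rcases h with h | ⟨h, _⟩ <;> omega
  · have h' : ¬ p.1 < q.1 := fun hc => h (Or.inl hc)
    omega

lemma pvMax2_chain_snd (u l d : Int) :
    (pvMax2 (pvMax2 (u, "up") (l, "left")) (d, "diag")).2 =
      if l ≤ u ∧ d ≤ u then "up" else if d ≤ l then "left" else "diag" := by
  have h1 : pvStrLt "up".toList "left".toList = false := by decide
  have h2 : pvStrLt "up".toList "diag".toList = false := by decide
  have h3 : pvStrLt "left".toList "diag".toList = false := by decide
  unfold pvMax2
  by_cases hul : u < l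
  · simp only [hul, true_or, if_true]
    by_cases hld : l < d
    · simp only [h3, hld, true_or, if_true]
      split_ifs <;> first | rfl | omega
    · simp only [h3, hld, Bool.false_eq_true, and_false, false_or, if_false]
      split_ifs <;> first | rfl | omega
  · simp only [hul, h1, Bool.false_eq_true, and_false, or_false, false_or, if_false]
    by_cases hud : u < d
    · simp only [h2, hud, true_or, if_true]
      split_ifs <;> first | rfl | omega
    · simp only [h2, hud, Bool.false_eq_true, and_false, false_or, if_false]
      split_ifs <;> first | rfl | omega

lemma pvTag_eq (vl wl : List Char) (ma mm ind : Int) (i j : Nat) :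
    pvTag vl wl ma mm ind i j =
      (if pvD vl wl ma mm ind i (j - 1) - ind ≤ pvD vl wl ma mm ind (i - 1) j - ind ∧
          pvD vl wl ma mm ind (i - 1) (j - 1) + pvScore vl wl ma mm i j ≤ pvD vl wl ma mm ind (i - 1) j - ind
        then "up"
        else if pvD vl wl ma mm ind (i - 1) (j - 1) + pvScore vl wl ma mm i j ≤ pvD vl wl ma mm ind i (j - 1) - ind
        then "left" else "diag") := by
  unfold pvTag; rw [pvMax2_chain_snd]

-- reads from the partial matrix entries
lemma part_read_prevrow (vl wl : List Char) (ma mm ind : Int) (n m i l j : Nat)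
    (hi : 1 ≤ i) (hin : i ≤ n) (hj : j ≤ m) :
    pvPart vl wl ma mm ind n m i l (i - 1) j = pvD vl wl ma mm ind (i - 1) j := by
  unfold pvPart
  rcases Nat.eq_zero_or_pos (i - 1) with h0 | h0
  · rw [h0]; simp
  · rcases Nat.eq_zero_or_pos j with hj0 | hj0
    · rw [hj0]
      rw [pvD_col0 _ _ _ _ _ _ h0]
      split_ifs <;> first | rfl | omega
    · split_ifs <;> first | rfl | omega

lemma part_read_currow (vl wl : List Char) (ma mm ind : Int) (n m i l j : Nat)
    (hi : 1 ≤ i) (hin : i ≤ n) (hj : j ≤ m) (hjl : j ≤ l) :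
    pvPart vl wl ma mm ind n m i l i j = pvD vl wl ma mm ind i j := by
  unfold pvPart
  rcases Nat.eq_zero_or_pos j with hj0 | hj0
  · rw [hj0, pvD_col0 _ _ _ _ _ _ hi]
    split_ifs <;> first | rfl | omega
  · split_ifs <;> first | rfl | omega

lemma part_read_full (vl wl : List Char) (ma mm ind : Int) (n m i j : Nat)
    (hin : i ≤ n) (hj : j ≤ m) :
    pvPart vl wl ma mm ind n m n m i j = pvD vl wl ma mm ind i j := by
  unfold pvPart
  rcases Nat.eq_zero_or_pos i with h0 | h0
  · rw [h0]; simp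
  · rcases Nat.eq_zero_or_pos j with hj0 | hj0
    · rw [hj0, pvD_col0 _ _ _ _ _ _ h0]
      split_ifs <;> first | rfl | omega
    · split_ifs <;> first | rfl | omega

lemma part_upd (vl wl : List Char) (ma mm ind : Int) (n m i l : Nat)
    (hi : 1 ≤ i) (hin : i ≤ n) (hl : l < m) :
    (fun i' j' => if i' = i ∧ j' = l + 1 then pvD vl wl ma mm ind i (l + 1)
        else pvPart vl wl ma mm ind n m i l i' j') =
      pvPart vl wl ma mm ind n m i (l + 1) := by
  funext i' j'
  by_cases hc : i' = i ∧ j' = l + 1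
  · obtain ⟨h1, h2⟩ := hc; subst h1; subst h2
    unfold pvPart
    split_ifs <;> first | rfl | omega
  · rw [if_neg hc]
    unfold pvPart
    split_ifs <;> first | rfl | omega

lemma bpart_upd (vl wl : List Char) (ma mm ind : Int) (n m i l : Nat)
    (hi : 1 ≤ i) (hin : i ≤ n) (hl : l < m) :
    (fun i' j' => if i' = i ∧ j' = l + 1 then some (pvTag vl wl ma mm ind i (l + 1))
        else pvBPart vl wl ma mm ind n m i l i' j') =
      pvBPart vl wl ma mm ind n m i (l + 1) := by
  funext i' j'
  by_cases hc : i' = i ∧ j' = l + 1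
  · obtain ⟨h1, h2⟩ := hc; subst h1; subst h2
    unfold pvBPart
    split_ifs <;> first | rfl | omega
  · rw [if_neg hc]
    unfold pvBPart
    split_ifs <;> first | rfl | omega

-- one A-cell
lemma cellA_step (vl wl : List Char) (ma mm ind : Int) (n m i l : Nat)
    (hi : 1 ≤ i) (hin : i ≤ n) (hl : l < m) :
    pvCellA vl wl ma mm ind i
        (pvMat (pvPart vl wl ma mm ind n m i l) n m, pvMat (pvBPart vl wl ma mm ind n m i l) n m)
        (l + 1) =
      (pvMat (pvPart vl wl ma mm ind n m i (l + 1)) n m,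
        pvMat (pvBPart vl wl ma mm ind n m i (l + 1)) n m) := by
  unfold pvCellA
  simp only [Nat.add_sub_cancel, pvMat_get]
  rw [if_pos (by omega : i - 1 ≤ n ∧ l + 1 ≤ m), if_pos (by omega : i ≤ n ∧ l ≤ m),
    if_pos (by omega : i - 1 ≤ n ∧ l ≤ m)]
  rw [part_read_prevrow vl wl ma mm ind n m i l (l + 1) hi hin (by omega),
    part_read_currow vl wl ma mm ind n m i l l hi hin (by omega) (by omega),
    part_read_prevrow vl wl ma mm ind n m i l l hi hin (by omega)]
  have hval : (pvMax2 (pvMax2 (pvD vl wl ma mm ind (i - 1) (l + 1) - ind, "up")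
      (pvD vl wl ma mm ind i l - ind, "left"))
      (pvD vl wl ma mm ind (i - 1) l + pvScore vl wl ma mm i (l + 1), "diag")).1 =
      pvD vl wl ma mm ind i (l + 1) := by
    rw [pvMax2_fst, pvMax2_fst]
    rw [pvD_cell vl wl ma mm ind i (l + 1) hi (by omega)]
    simp
  have htag : (pvMax2 (pvMax2 (pvD vl wl ma mm ind (i - 1) (l + 1) - ind, "up")
      (pvD vl wl ma mm ind i l - ind, "left"))
      (pvD vl wl ma mm ind (i - 1) l + pvScore vl wl ma mm i (l + 1), "diag")).2 =
      pvTag vl wl ma mm ind i (l + 1) := by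
    unfold pvTag; simp only [Nat.add_sub_cancel]
  rw [hval, htag, Prod.mk.injEq]
  constructor
  · rw [pvMat_set _ _ _ _ _ _ hin (by omega)]
    rw [pvMat_congr _ (pvPart vl wl ma mm ind n m i (l + 1)) n m]
    intro i' j' _ _
    rw [← part_upd vl wl ma mm ind n m i l hi hin hl]
  · rw [pvMat_set _ _ _ _ _ _ hin (by omega)]
    rw [pvMat_congr _ (pvBPart vl wl ma mm ind n m i (l + 1)) n m]
    intro i' j' _ _
    rw [← bpart_upd vl wl ma mm ind n m i l hi hin hl]

-- the inner fold over one row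
lemma rowA_fold (vl wl : List Char) (ma mm ind : Int) (n m i : Nat) (hi : 1 ≤ i) (hin : i ≤ n) :
    ∀ (cnt l : Nat), l + cnt = m →
    (List.range' (l + 1) cnt).foldl (pvCellA vl wl ma mm ind i)
        (pvMat (pvPart vl wl ma mm ind n m i l) n m, pvMat (pvBPart vl wl ma mm ind n m i l) n m) =
      (pvMat (pvPart vl wl ma mm ind n m i m) n m, pvMat (pvBPart vl wl ma mm ind n m i m) n m) := by
  intro cnt
  induction cnt with
  | zero => intro l hl; simp at hl; rw [hl]; rfl
  | succ k ih =>
    intro l hl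
    rw [List.range'_succ, List.foldl_cons]
    rw [cellA_step vl wl ma mm ind n m i l hi hin (by omega)]
    have := ih (l + 1) (by omega)
    simpa using this

lemma part_next_row (vl wl : List Char) (ma mm ind : Int) (n m i : Nat) :
    pvPart vl wl ma mm ind n m i m = pvPart vl wl ma mm ind n m (i + 1) 0 := by
  funext i' j'
  unfold pvPart
  split_ifs <;> first | rfl | omega

lemma bpart_next_row (vl wl : List Char) (ma mm ind : Int) (n m i : Nat) :
    pvBPart vl wl ma mm ind n m i m = pvBPart vl wl ma mm ind n m (i + 1) 0 := by
  funext i' j'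
  unfold pvBPart
  split_ifs <;> first | rfl | omega

lemma fillA_outer (vl wl : List Char) (ma mm ind : Int) (n m : Nat) :
    ∀ (cnt i0 : Nat), i0 + cnt = n →
    (List.range' (i0 + 1) cnt).foldl (pvRowA vl wl ma mm ind m)
        (pvMat (pvPart vl wl ma mm ind n m i0 m) n m, pvMat (pvBPart vl wl ma mm ind n m i0 m) n m) =
      (pvMat (pvPart vl wl ma mm ind n m n m) n m, pvMat (pvBPart vl wl ma mm ind n m n m) n m) := by
  intro cnt
  induction cnt with
  | zero => intro i0 h; simp at h; rw [h]; rfl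
  | succ k ih =>
    intro i0 h
    rw [List.range'_succ, List.foldl_cons]
    have hrow : pvRowA vl wl ma mm ind m
        (pvMat (pvPart vl wl ma mm ind n m i0 m) n m, pvMat (pvBPart vl wl ma mm ind n m i0 m) n m)
        (i0 + 1) =
        (pvMat (pvPart vl wl ma mm ind n m (i0 + 1) m) n m,
          pvMat (pvBPart vl wl ma mm ind n m (i0 + 1) m) n m) := by
      unfold pvRowA
      rw [part_next_row, bpart_next_row]
      have := rowA_fold vl wl ma mm ind n m (i0 + 1) (by omega) (by omega) m 0 (by omega)
      simpa using this
    rw [hrow]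
    have := ih (i0 + 1) (by omega)
    simpa using this

lemma row0_fold (vl wl : List Char) (ma mm ind : Int) (n m : Nat) :
    ∀ (cnt s : Nat) (g : Nat → Nat → Int), s + cnt = m + 1 → 1 ≤ s →
    ((List.range' s cnt).foldl (fun d j => pvSet2 d 0 j (-ind * (j : Int))) (pvMat g n m)) =
      pvMat (fun i' j' => if i' = 0 ∧ s ≤ j' ∧ j' < s + cnt then -ind * (j' : Int) else g i' j') n m := by
  intro cnt
  induction cnt with
  | zero =>
    intro s g hs hs1
    rw [show List.range' s 0 = [] from rfl, List.foldl_nil]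
    rw [pvMat_congr g _ n m]
    intro i' j' _ _
    rw [if_neg (by omega)]
  | succ k ih =>
    intro s g hs hs1
    rw [List.range'_succ, List.foldl_cons]
    rw [pvMat_set _ _ _ _ _ _ (by omega) (by omega)]
    rw [ih (s + 1) _ (by omega) (by omega)]
    rw [pvMat_congr _ _ n m]
    intro i' j' _ _
    by_cases hc : i' = 0 ∧ s ≤ j' ∧ j' < s + (k + 1)
    · rw [if_pos hc]
      by_cases hc2 : i' = 0 ∧ s + 1 ≤ j' ∧ j' < s + 1 + k
      · rw [if_pos hc2]
      · rw [if_neg hc2, if_pos (by omega)]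
        rw [show j' = s by omega]
    · rw [if_neg hc, if_neg (by omega), if_neg (by omega)]

lemma col0_fold (vl wl : List Char) (ma mm ind : Int) (n m : Nat) :
    ∀ (L : List Nat) (g : Nat → Nat → Int), (∀ i ∈ L, i ≤ n ∧ g i 0 = 0) →
    (L.foldl (fun d i => pvSet2 d i 0 0) (pvMat g n m)) = pvMat g n m := by
  intro L
  induction L with
  | nil => intro g _; rfl
  | cons a L ih =>
    intro g hmem
    rw [List.foldl_cons]
    rw [pvMat_set _ _ _ _ _ _ (hmem a List.mem_cons_self).1 (by omega)]
    have hupd : pvMat (fun i' j' => if i' = a ∧ j' = 0 then 0 else g i' j') n m = pvMat g n m := by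
      rw [pvMat_congr _ g n m]
      intro i' j' _ _
      by_cases hc : i' = a ∧ j' = 0
      · rw [if_pos hc, hc.1, hc.2, (hmem a List.mem_cons_self).2]
      · rw [if_neg hc]
    rw [hupd]
    exact ih g (fun x hx => hmem x (List.mem_cons_of_mem _ hx))

lemma fillA_eq (vl wl : List Char) (ma mm ind : Int) (n m : Nat) :
    pvFillA vl wl ma mm ind n m =
      (pvMat (pvPart vl wl ma mm ind n m n m) n m, pvMat (pvBPart vl wl ma mm ind n m n m) n m) := by
  simp only [pvFillA]
  rw [pvMat_const (0 : Int) n m, pvMat_const (none : Option String) n m]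
  rw [row0_fold vl wl ma mm ind n m m 1 _ (by omega) (by omega)]
  have hrow0 : pvMat (fun i' j' => if i' = 0 ∧ 1 ≤ j' ∧ j' < 1 + m then -ind * (j' : Int)
      else (fun _ _ => (0 : Int)) i' j') n m = pvMat (pvPart vl wl ma mm ind n m 0 m) n m := by
    rw [pvMat_congr _ _ n m]
    intro i' j' _ hj
    unfold pvPart
    rcases Nat.eq_zero_or_pos j' with hj0 | hj0
    · rw [hj0]
      split_ifs <;> first | rfl | omega | (rw [pvD_row0]; simp)
    · split_ifs <;> first | rfl | omega | (rw [pvD_row0]) | (exfalso; omega)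
  rw [hrow0]
  rw [col0_fold vl wl ma mm ind n m _ _ ?hz]
  case hz =>
    intro i hi
    have hmem := List.mem_range'.mp hi
    refine ⟨by omega, ?_⟩
    unfold pvPart
    split_ifs <;> first | rfl | omega
  have hb : pvMat (fun _ _ => (none : Option String)) n m =
      pvMat (pvBPart vl wl ma mm ind n m 0 m) n m := by
    rw [pvMat_congr _ _ n m]
    intro i' j' _ _
    unfold pvBPart
    split_ifs <;> first | rfl | omega
  rw [hb]
  exact fillA_outer vl wl ma mm ind n m n 0 (by omega)

-- ===== B-side: the rows list holds exactly the pvD rows =====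
def pvRowD (vl wl : List Char) (ma mm ind : Int) (m i : Nat) : List Int :=
  (List.range (m + 1)).map (pvD vl wl ma mm ind i)

lemma rowD_getD (vl wl : List Char) (ma mm ind : Int) (m i j : Nat) (hj : j ≤ m) :
    (pvRowD vl wl ma mm ind m i).getD j 0 = pvD vl wl ma mm ind i j := by
  unfold pvRowD
  rw [List.getD_eq_getElem?_getD, List.getElem?_map, List.getElem?_range (by omega : j < m + 1)]
  rfl

lemma nextRow_inv (vl wl : List Char) (ma mm ind : Int) (m i : Nat) :
    ∀ (cnt l : Nat), l + cnt = m →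
    (List.range' (l + 1) cnt).foldl
        (pvBRowStep wl ma mm ind (pvRowD vl wl ma mm ind m i) (vl.getD i ' '))
        ((List.range (l + 1)).map (pvD vl wl ma mm ind (i + 1))) =
      pvRowD vl wl ma mm ind m (i + 1) := by
  intro cnt
  induction cnt with
  | zero => intro l hl; simp at hl; rw [hl]; rfl
  | succ k ih =>
    intro l hl
    rw [List.range'_succ, List.foldl_cons]
    have hstep : pvBRowStep wl ma mm ind (pvRowD vl wl ma mm ind m i) (vl.getD i ' ')
        ((List.range (l + 1)).map (pvD vl wl ma mm ind (i + 1))) (l + 1) =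
        (List.range (l + 1 + 1)).map (pvD vl wl ma mm ind (i + 1)) := by
      unfold pvBRowStep
      simp only [Nat.add_sub_cancel]
      rw [rowD_getD vl wl ma mm ind m i (l + 1) (by omega),
        rowD_getD vl wl ma mm ind m i l (by omega)]
      have hrow : ((List.range (l + 1)).map (pvD vl wl ma mm ind (i + 1))).getD l 0 =
          pvD vl wl ma mm ind (i + 1) l := by
        rw [List.getD_eq_getElem?_getD, List.getElem?_map, List.getElem?_range (by omega : l < l + 1)]
        rfl
      rw [hrow]
      have hscore : (if vl.getD i ' ' == wl.getD l ' ' then ma else -mm) =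
          pvScore vl wl ma mm (i + 1) (l + 1) := rfl
      rw [hscore]
      have hcell := pvD_cell vl wl ma mm ind (i + 1) (l + 1) (by omega) (by omega)
      simp only [Nat.add_sub_cancel] at hcell
      rw [← hcell]
      conv_rhs => rw [List.range_succ, List.map_append]
      rfl
    rw [hstep]
    have := ih (l + 1) (by omega)
    simpa using this

lemma nextRow_eq (vl wl : List Char) (ma mm ind : Int) (m i : Nat) :
    pvBNextRow wl ma mm ind m (pvRowD vl wl ma mm ind m i) (vl.getD i ' ') =
      pvRowD vl wl ma mm ind m (i + 1) := by
  unfold pvBNextRow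
  have h0 : ([0] : List Int) = (List.range (0 + 1)).map (pvD vl wl ma mm ind (i + 1)) := by
    simp [pvD_col0 vl wl ma mm ind (i + 1) (by omega)]
  rw [h0]
  have := nextRow_inv vl wl ma mm ind m i m 0 (by omega)
  simpa using this

lemma rows_inv (vl wl : List Char) (ma mm ind : Int) (m : Nat) :
    ∀ (cs : List Char) (k : Nat), k ≤ vl.length → cs = vl.drop k →
    (cs.foldl (fun rp c =>
        let nr := pvBNextRow wl ma mm ind m rp.2 c
        (rp.1 ++ [nr], nr))
      (((List.range (k + 1)).map (pvRowD vl wl ma mm ind m), pvRowD vl wl ma mm ind m k) :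
        List (List Int) × List Int)) =
      ((List.range (vl.length + 1)).map (pvRowD vl wl ma mm ind m),
        pvRowD vl wl ma mm ind m vl.length) := by
  intro cs
  induction cs with
  | nil =>
    intro k hk hdrop
    have : vl.length ≤ k := by
      by_contra h
      have := List.drop_eq_nil_iff.mp hdrop.symm
      omega
    have hk' : k = vl.length := by omega
    rw [hk']
    rfl
  | cons c cs' ih =>
    intro k hk hdrop
    have hklt : k < vl.length := by
      by_contra h
      rw [List.drop_eq_nil_of_le (by omega)] at hdrop
      simp at hdrop
    have hd := List.drop_eq_getElem_cons hklt
    rw [hd] at hdrop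
    have hc : c = vl[k] := (List.cons.injEq _ _ _ _ ▸ hdrop).1
    have hcs : cs' = vl.drop (k + 1) := (List.cons.injEq _ _ _ _ ▸ hdrop).2
    rw [List.foldl_cons]
    have hcgetD : c = vl.getD k ' ' := by
      rw [hc, List.getD_eq_getElem?_getD, List.getElem?_eq_getElem hklt]; rfl
    have hstep : (let nr := pvBNextRow wl ma mm ind m (pvRowD vl wl ma mm ind m k) c
        (((List.range (k + 1)).map (pvRowD vl wl ma mm ind m) ++ [nr], nr) :
          List (List Int) × List Int)) =
        ((List.range (k + 1 + 1)).map (pvRowD vl wl ma mm ind m),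
          pvRowD vl wl ma mm ind m (k + 1)) := by
      rw [hcgetD, nextRow_eq vl wl ma mm ind m k]
      conv_rhs => rw [List.range_succ, List.map_append]
      rfl
    simp only at hstep ⊢
    rw [hstep]
    exact ih (k + 1) (by omega) hcs

lemma rows_eq (vl wl : List Char) (ma mm ind : Int) (m : Nat) :
    pvBRows vl wl ma mm ind m = (List.range (vl.length + 1)).map (pvRowD vl wl ma mm ind m) := by
  unfold pvBRows
  have hrow0 : ((List.range (m + 1)).map fun (j : Nat) => -ind * (j : Int)) =
      pvRowD vl wl ma mm ind m 0 := by
    unfold pvRowD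
    apply List.map_congr_left
    intro j _
    rw [pvD_row0]
  simp only [hrow0]
  have hinit : (([pvRowD vl wl ma mm ind m 0], pvRowD vl wl ma mm ind m 0) :
      List (List Int) × List Int) =
      ((List.range (0 + 1)).map (pvRowD vl wl ma mm ind m), pvRowD vl wl ma mm ind m 0) := by
    simp
  rw [hinit]
  have := rows_inv vl wl ma mm ind m vl 0 (by omega) (by simp)
  rw [this]

lemma rows_read (vl wl : List Char) (ma mm ind : Int) (m i j : Nat)
    (hi : i ≤ vl.length) (hj : j ≤ m) :
    ((pvBRows vl wl ma mm ind m).getD i []).getD j 0 = pvD vl wl ma mm ind i j := by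
  rw [rows_eq]
  have hrow : (((List.range (vl.length + 1)).map (pvRowD vl wl ma mm ind m)).getD i []) =
      pvRowD vl wl ma mm ind m i := by
    rw [List.getD_eq_getElem?_getD, List.getElem?_map,
      List.getElem?_range (by omega : i < vl.length + 1)]
    rfl
  rw [hrow, rowD_getD vl wl ma mm ind m i j hj]

-- ===== best-row search =====
lemma best_agree (g : Nat → Int) (m : Nat) (dp : List (List Int))
    (hg : ∀ i, g i = pvGet2 dp 0 i m) (L : List Nat) :
    ∀ (b : Nat),
    L.foldl (pvBStepA dp m) (some (g b), (b : Int)) =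
      (some (g (L.foldl (fun b i => if g b < g i then i else b) b)),
        ((L.foldl (fun b i => if g b < g i then i else b) b : Nat) : Int)) := by
  induction L with
  | nil => intro b; rfl
  | cons a L ih =>
    intro b
    rw [List.foldl_cons, List.foldl_cons]
    by_cases h : g b < g a
    · have hstep : pvBStepA dp m (some (g b), (b : Int)) a = (some (g a), (a : Int)) := by
        unfold pvBStepA; rw [← hg a]; simp [h]
      rw [hstep, if_pos h]; exact ih a
    · have hstep : pvBStepA dp m (some (g b), (b : Int)) a = (some (g b), (b : Int)) := by
        unfold pvBStepA; rw [← hg a]; simp [h]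
      rw [hstep, if_neg h]; exact ih b

lemma bfold_bounds (g : Nat → Int) (n : Nat) (hn : 1 ≤ n) :
    ∀ (L : List Nat) (b : Nat), (∀ x ∈ L, 1 ≤ x ∧ x ≤ n) → 1 ≤ b → b ≤ n →
      1 ≤ L.foldl (fun b i => if g b < g i then i else b) b ∧
        L.foldl (fun b i => if g b < g i then i else b) b ≤ n := by
  intro L
  induction L with
  | nil => intro b _ h1 h2; exact ⟨h1, h2⟩
  | cons a L ih =>
    intro b hmem h1 h2
    rw [List.foldl_cons]
    by_cases h : g b < g a
    · rw [if_pos h]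
      exact ih a (fun x hx => hmem x (List.mem_cons_of_mem _ hx))
        (hmem a List.mem_cons_self).1 (hmem a List.mem_cons_self).2
    · rw [if_neg h]
      exact ih b (fun x hx => hmem x (List.mem_cons_of_mem _ hx)) h1 h2

lemma bfold_congr (g h : Nat → Int) (n : Nat) (hgh : ∀ x, x ≤ n → g x = h x) :
    ∀ (L : List Nat) (b : Nat), (∀ x ∈ L, x ≤ n) → b ≤ n →
      L.foldl (fun b i => if g b < g i then i else b) b =
        L.foldl (fun b i => if h b < h i then i else b) b := by
  intro L
  induction L with
  | nil => intro b _ _; rfl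
  | cons a L ih =>
    intro b hmem hb
    rw [List.foldl_cons, List.foldl_cons]
    rw [hgh b hb, hgh a (hmem a List.mem_cons_self)]
    by_cases hc : h b < h a
    · rw [if_pos hc]
      exact ih a (fun x hx => hmem x (List.mem_cons_of_mem _ hx)) (hmem a List.mem_cons_self)
    · rw [if_neg hc]
      exact ih b (fun x hx => hmem x (List.mem_cons_of_mem _ hx)) hb

-- ===== traceback =====
lemma traceA_j0 (bt : List (List (Option String))) (vl wl : List Char) (f i : Nat)
    (va wa : List Char) : pvTraceA bt vl wl f i 0 va wa = (va, wa) := by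
  cases f with
  | zero => rfl
  | succ k => simp [pvTraceA]

lemma traceA_spin (vl wl : List Char) (ma mm ind : Int) (n m : Nat) :
    ∀ (f j : Nat) (va wa : List Char),
    pvTraceA (pvMat (pvBPart vl wl ma mm ind n m n m) n m) vl wl f 0 j va wa = (va, wa) := by
  intro f
  induction f with
  | zero => intro j va wa; rfl
  | succ k ih =>
    intro j va wa
    by_cases hj : 0 < j
    · have hb : pvGet2 (pvMat (pvBPart vl wl ma mm ind n m n m) n m) none 0 j = none := by
        rw [pvMat_get]
        split_ifs with h
        · simp [pvBPart]
        · rfl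
      simp only [pvTraceA, hb, if_pos hj]
      simpa using ih j va wa
    · simp [pvTraceA, hj]

lemma bTrace_j0 (rows : List (List Int)) (vl wl : List Char) (ma mm ind : Int) (i : Nat) :
    pvBTrace rows vl wl ma mm ind i 0 = ([], []) := by
  cases i with
  | zero => simp [pvBTrace]
  | succ k => simp [pvBTrace]

lemma trace_eq (vl wl : List Char) (ma mm ind : Int) (n m : Nat) (hn : n = vl.length) :
    ∀ (fA i j : Nat) (va wa : List Char), i ≤ n → j ≤ m → i + j ≤ fA →
    pvTraceA (pvMat (pvBPart vl wl ma mm ind n m n m) n m) vl wl fA i j va wa =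
      (va ++ (pvBTrace (pvBRows vl wl ma mm ind m) vl wl ma mm ind i j).1.reverse,
        wa ++ (pvBTrace (pvBRows vl wl ma mm ind m) vl wl ma mm ind i j).2.reverse) := by
  intro fA
  induction fA with
  | zero =>
    intro i j va wa hin hjm hf
    have hi : i = 0 := by omega
    have hj : j = 0 := by omega
    rw [hi, hj, traceA_j0, bTrace_j0]
    simp
  | succ fa ih =>
    intro i j va wa hin hjm hf
    cases j with
    | zero =>
      rw [traceA_j0, bTrace_j0]
      simp
    | succ j' =>
      cases i with
      | zero =>
        rw [traceA_spin]
        have : pvBTrace (pvBRows vl wl ma mm ind m) vl wl ma mm ind 0 (j' + 1) = ([], []) := by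
          simp [pvBTrace]
        rw [this]
        simp
      | succ i' =>
        have hbt : pvGet2 (pvMat (pvBPart vl wl ma mm ind n m n m) n m) none (i' + 1) (j' + 1) =
            some (pvTag vl wl ma mm ind (i' + 1) (j' + 1)) := by
          rw [pvMat_get, if_pos (by omega : i' + 1 ≤ n ∧ j' + 1 ≤ m)]
          unfold pvBPart
          split_ifs with h
          · rfl
          · exfalso; omega
        have hup : ((pvBRows vl wl ma mm ind m).getD i' []).getD (j' + 1) 0 =
            pvD vl wl ma mm ind i' (j' + 1) :=
          rows_read vl wl ma mm ind m i' (j' + 1) (by omega) (by omega)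
        have hleft : ((pvBRows vl wl ma mm ind m).getD (i' + 1) []).getD j' 0 =
            pvD vl wl ma mm ind (i' + 1) j' :=
          rows_read vl wl ma mm ind m (i' + 1) j' (by omega) (by omega)
        have hdiag : ((pvBRows vl wl ma mm ind m).getD i' []).getD j' 0 =
            pvD vl wl ma mm ind i' j' :=
          rows_read vl wl ma mm ind m i' j' (by omega) (by omega)
        have hscore : (if vl.getD i' ' ' == wl.getD j' ' ' then ma else -mm) =
            pvScore vl wl ma mm (i' + 1) (j' + 1) := rfl
        rw [show pvBTrace (pvBRows vl wl ma mm ind m) vl wl ma mm ind (i' + 1) (j' + 1) =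
            (let s := if vl.getD i' ' ' == wl.getD j' ' ' then ma else -mm
             let up := (((pvBRows vl wl ma mm ind m)).getD i' []).getD (j' + 1) 0 - ind
             let left := (((pvBRows vl wl ma mm ind m)).getD (i' + 1) []).getD j' 0 - ind
             let diag := (((pvBRows vl wl ma mm ind m)).getD i' []).getD j' 0 + s
             if left ≤ up ∧ diag ≤ up then
               let p := pvBTrace (pvBRows vl wl ma mm ind m) vl wl ma mm ind i' (j' + 1)
               (p.1 ++ [vl.getD i' ' '], p.2 ++ ['-'])
             else if diag ≤ left then
               let p := pvBTrace (pvBRows vl wl ma mm ind m) vl wl ma mm ind (i' + 1) j'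
               (p.1 ++ ['-'], p.2 ++ [wl.getD j' ' '])
             else
               let p := pvBTrace (pvBRows vl wl ma mm ind m) vl wl ma mm ind i' j'
               (p.1 ++ [vl.getD i' ' '], p.2 ++ [wl.getD j' ' '])) from by rw [pvBTrace]]
        simp only [hup, hleft, hdiag, hscore]
        simp only [pvTraceA, hbt, Nat.add_sub_cancel, if_pos (by omega : 0 < j' + 1)]
        rw [pvTag_eq]
        simp only [Nat.add_sub_cancel]
        by_cases hU : pvD vl wl ma mm ind (i' + 1) j' - ind ≤ pvD vl wl ma mm ind i' (j' + 1) - ind ∧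
            pvD vl wl ma mm ind i' j' + pvScore vl wl ma mm (i' + 1) (j' + 1) ≤
              pvD vl wl ma mm ind i' (j' + 1) - ind
        · rw [if_pos hU, if_pos hU]
          have e1 : (some "up" == some "diag") = false := by decide
          have e2 : (some "up" == some "up") = true := by decide
          simp only [e1, e2, Bool.false_eq_true, if_false, if_true]
          rw [ih i' (j' + 1) (va ++ [vl.getD i' ' ']) (wa ++ ['-']) (by omega) hjm (by omega)]
          simp
        · rw [if_neg hU, if_neg hU]
          by_cases hL : pvD vl wl ma mm ind i' j' + pvScore vl wl ma mm (i' + 1) (j' + 1) ≤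
              pvD vl wl ma mm ind (i' + 1) j' - ind
          · rw [if_pos hL, if_pos hL]
            have e1 : (some "left" == some "diag") = false := by decide
            have e2 : (some "left" == some "up") = false := by decide
            have e3 : (some "left" == some "left") = true := by decide
            simp only [e1, e2, e3, Bool.false_eq_true, if_false, if_true]
            rw [ih (i' + 1) j' (va ++ ['-']) (wa ++ [wl.getD j' ' ']) (by omega) (by omega) (by omega)]
            simp
          · rw [if_neg hL, if_neg hL]
            have e1 : (some "diag" == some "diag") = true := by decide
            simp only [e1, if_true]
            rw [ih i' j' (va ++ [vl.getD i' ' ']) (wa ++ [wl.getD j' ' ']) (by omega) (by omega)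
              (by omega)]
            simp

-- ===== VERDICT (by name: the statement is the Claim_ definition above) =====
theorem OverlapAlignment_spec : Claim_equal_OverlapAlignment := by
  intro v w ma mm ind _ hpre
  show OverlapAlignment v w ma mm ind = OverlapAlignment_alt v w ma mm ind
  obtain ⟨hv, -, -⟩ := hpre
  simp only [OverlapAlignment, OverlapAlignment_alt]
  set vl := v.toList with hvl
  set wl := w.toList with hwl
  set n := vl.length with hn
  set m := wl.length with hm
  have hn1 : 1 ≤ n := by
    rcases vl with _ | ⟨c, cs⟩
    · exact absurd rfl hv
    · simp [hn]
  rw [fillA_eq]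
  -- the best-row folds of the two programs coincide
  set gA : Nat → Int := fun i => pvGet2 (pvMat (pvPart vl wl ma mm ind n m n m) n m) 0 i m with hgA
  set gD : Nat → Int := fun i => pvD vl wl ma mm ind i m with hgD
  have hAD : ∀ x, x ≤ n → gA x = gD x := by
    intro x hx
    rw [hgA, hgD]
    simp only
    rw [pvMat_get, if_pos (by omega : x ≤ n ∧ m ≤ m),
      part_read_full vl wl ma mm ind n m x m hx (by omega)]
  have hmemL : ∀ x ∈ List.range' 2 (n - 1), 1 ≤ x ∧ x ≤ n := by
    intro x hx
    have := List.mem_range'.mp hx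
    omega
  have hbestB : pvBBest (pvBRows vl wl ma mm ind m) n m =
      (List.range' 2 (n - 1)).foldl (fun b i => if gD b < gD i then i else b) 1 := by
    unfold pvBBest
    refine bfold_congr (fun i => ((pvBRows vl wl ma mm ind m).getD i []).getD m 0) gD n ?_ _ 1
      (fun x hx => (hmemL x hx).2) hn1
    intro x hx
    rw [hgD]
    exact rows_read vl wl ma mm ind m x m (hn ▸ hx) (by omega)
  set bsel := (List.range' 2 (n - 1)).foldl (fun b i => if gD b < gD i then i else b) 1 with hbsel
  have hbounds := bfold_bounds gD n hn1 (List.range' 2 (n - 1)) 1 hmemL (by omega) hn1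
  have hbestA : pvBestA (pvMat (pvPart vl wl ma mm ind n m n m) n m) n m =
      (some (gD bsel), (bsel : Int)) := by
    unfold pvBestA
    have hrange : List.range' 1 n = 1 :: List.range' 2 (n - 1) := by
      obtain ⟨k, hk⟩ : ∃ k, n = k + 1 := ⟨n - 1, by omega⟩
      rw [hk, List.range'_succ]
      simp
    rw [hrange, List.foldl_cons]
    have hstep : pvBStepA (pvMat (pvPart vl wl ma mm ind n m n m) n m) m
        ((none : Option Int), (-1 : Int)) 1 = (some (gA 1), (((1 : Nat)) : Int)) := by
      unfold pvBStepA; simp [hgA]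
    rw [hstep]
    have := best_agree gA m (pvMat (pvPart vl wl ma mm ind n m n m) n m) (fun i => rfl)
      (List.range' 2 (n - 1)) 1
    rw [this]
    have hfe : (List.range' 2 (n - 1)).foldl (fun b i => if gA b < gA i then i else b) 1 = bsel := by
      rw [hbsel]
      exact bfold_congr gA gD n hAD _ 1 (fun x hx => (hmemL x hx).2) hn1
    rw [hfe, hAD bsel hbounds.2]
  rw [hbestA]
  simp only [Option.getD_some, Int.toNat_natCast]
  rw [hbestB]
  have htr := trace_eq vl wl ma mm ind n m hn (bsel + m) bsel m [] [] hbounds.2 (le_refl m)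
    (by omega)
  simp only [List.nil_append] at htr
  rw [htr]
  have hval : gD bsel = ((pvBRows vl wl ma mm ind m).getD bsel []).getD m 0 := by
    rw [hgD]
    exact (rows_read vl wl ma mm ind m bsel m (hn ▸ hbounds.2) (by omega)).symm
  rw [hval]
  simp
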